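-- pv_equiv track=rewrite | github.com/dmalt/advent_of_code_2024 | day5/solution.py | is_good_update
-- ===== SOURCE A (Python) =====
-- def is_good_update(update: list[str], rules: dict[str, set[str]]) -> bool:
--     for i, c in enumerate(update):
--         if c not in rules:
--             continue
--         for rule_page in rules[c]:
--             if rule_page not in update[i + 1 :]:
--                 return False
--     return True
-- ===== SOURCE B (Python) =====
-- def is_good_update(update: list[str], rules: dict[str, set[str]]) -> bool:
--     # Build the last-occurrence index of every page once, then check each rule
--     # entry directly: every required page must occur strictly after the last
--     # occurrence of the constrained page.
--     last = {}
--     for i, p in enumerate(update):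
--         last[p] = i
--     for c, req in rules.items():
--         i = last.get(c)
--         if i is None:
--             continue
--         for p in req:
--             if last.get(p, -1) <= i:
--                 return False
--     return True
-- ===== Notes on version B (the rewrite author's own statement) =====
-- stated objective: alternative
-- what changed: A's nested forward scan (for each position, re-search every required page in the suffix slice update[i+1:]) is replaced by building a last-occurrence index dict over update once and then iterating over the RULES, comparing indices (last[p] > last[c]); the per-occurrence suffix scans disappear.
import Mathlib
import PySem

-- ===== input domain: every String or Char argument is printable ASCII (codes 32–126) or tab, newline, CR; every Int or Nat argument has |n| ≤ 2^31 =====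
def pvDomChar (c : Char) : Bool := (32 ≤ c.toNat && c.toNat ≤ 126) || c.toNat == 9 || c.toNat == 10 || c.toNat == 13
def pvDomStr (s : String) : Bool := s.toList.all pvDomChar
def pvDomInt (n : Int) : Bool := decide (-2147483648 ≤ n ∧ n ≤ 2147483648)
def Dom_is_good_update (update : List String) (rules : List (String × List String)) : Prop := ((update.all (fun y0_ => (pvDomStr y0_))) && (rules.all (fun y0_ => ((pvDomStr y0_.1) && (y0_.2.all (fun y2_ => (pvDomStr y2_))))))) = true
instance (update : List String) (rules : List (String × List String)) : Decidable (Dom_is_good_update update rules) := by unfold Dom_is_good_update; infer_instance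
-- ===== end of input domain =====

-- B replaces A's nested scan of suffix slices by: build the last-occurrence index of
-- every page once, then iterate over the RULES checking indices (objective: alternative).

-- ===== PORT A =====
-- dict lookup (first match)
def pvLookup : List (String × List String) → String → Option (List String)
  | [], _ => none
  | (k, v) :: rest, c => if k == c then some v else pvLookup rest c

-- A: for i, c in enumerate(update): the suffix update[i+1:] is exactly the tail carried
-- by the structural recursion; 'rule_page not in update[i+1:] → return False' is the &&.
def isGoodA (rules : List (String × List String)) : List String → Bool
  | [] => true
  | c :: rest =>
    match pvLookup rules c with
    | none => isGoodA rules rest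
    | some req => (req.all fun p => rest.contains p) && isGoodA rules rest

def is_good_update (update : List String) (rules : List (String × List String)) : Bool :=
  isGoodA rules update

-- ===== PORT B =====
-- B: last[p] = i for i, p in enumerate(update)  (dict insert overwrites: last occurrence wins)
def buildLast : Int → PySem.Dict String Int → List String → PySem.Dict String Int
  | _, d, [] => d
  | i, d, p :: rest => buildLast (i + 1) (d.insert p i) rest

-- B: for c, req in rules.items(): skip if c not in last; every p in req needs last[p] > last[c]
def checkRules (last : PySem.Dict String Int) : List (String × List String) → Bool
  | [] => true
  | (c, req) :: rest =>
    match PySem.Dict.get? last c with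
    | none => checkRules last rest
    | some i =>
      if req.all (fun p => decide (i < PySem.Dict.getD last p (-1))) then checkRules last rest
      else false

def is_good_update_alt (update : List String) (rules : List (String × List String)) : Bool :=
  checkRules (buildLast 0 PySem.Dict.empty update) rules

-- ===== PRECONDITION & SPEC =====
-- Pre_ excludes association lists whose keys repeat: `rules` is a Python dict, whose keys
-- are necessarily distinct, so such lists represent no Python input at all.
def Pre_is_good_update (update : List String) (rules : List (String × List String)) : Prop :=
  (rules.map Prod.fst).Nodup
instance (update : List String) (rules : List (String × List String)) : Decidable (Pre_is_good_update update rules) := by unfold Pre_is_good_update; infer_instance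

def pvWitness_is_good_update : List String × (List (String × List String)) :=
  (["1", "2", "3"], [("1", ["2", "3"]), ("2", ["3"])])

def Spec_is_good_update (update : List String) (rules : List (String × List String)) (out : Bool) : Prop := out = is_good_update_alt update rules
instance (update : List String) (rules : List (String × List String)) (out : Bool) : Decidable (Spec_is_good_update update rules out) := by unfold Spec_is_good_update; infer_instance

-- ===== CLAIM (what is proved, stated in full; the proofs are below) =====
def Claim_equal_is_good_update : Prop := ∀ (update : List String) (rules : List (String × List String)), Dom_is_good_update update rules → Pre_is_good_update update rules → Spec_is_good_update update rules (is_good_update update rules)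

-- ===== LEMMAS AND PROOFS =====

-- index of the LAST occurrence of p in l (proof-side helper)
def lastIdx : List String → String → Option Nat
  | [], _ => none
  | c :: rest, p =>
    match lastIdx rest p with
    | some j => some (j + 1)
    | none => if c = p then some 0 else none

lemma isSome_lastIdx (l : List String) (p : String) :
    (lastIdx l p).isSome ↔ p ∈ l := by
  induction l with
  | nil => simp [lastIdx]
  | cons c rest ih =>
    simp only [lastIdx, List.mem_cons]
    cases h : lastIdx rest p with
    | some j => simp [← ih, h]
    | none =>
      by_cases hc : c = p
      · simp [hc, ← ih, h]
      · have hpc : ¬ p = c := fun e => hc e.symm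
        simp [hc, hpc, ← ih, h]

lemma get?_lastIdx {l : List String} {p : String} {j : Nat}
    (h : lastIdx l p = some j) : l[j]? = some p := by
  induction l generalizing j with
  | nil => simp [lastIdx] at h
  | cons c rest ih =>
    simp only [lastIdx] at h
    cases hr : lastIdx rest p with
    | some j' =>
      rw [hr] at h
      cases h
      simpa using ih hr
    | none =>
      rw [hr] at h
      by_cases hc : c = p
      · simp [hc] at h; subst hc; cases h; simp
      · simp [hc] at h

lemma lastIdx_ge {l : List String} {i : Nat} {c : String}
    (h : l[i]? = some c) : ∃ j, lastIdx l c = some j ∧ i ≤ j := by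
  induction l generalizing i with
  | nil => simp at h
  | cons d rest ih =>
    cases i with
    | zero =>
      simp at h
      subst h
      simp only [lastIdx]
      cases hr : lastIdx rest d with
      | some j => exact ⟨j + 1, rfl, Nat.zero_le _⟩
      | none => exact ⟨0, by simp, le_refl 0⟩
    | succ i' =>
      simp only [List.getElem?_cons_succ] at h
      obtain ⟨j, hj, hle⟩ := ih h
      exact ⟨j + 1, by simp [lastIdx, hj], by omega⟩

lemma mem_drop_iff_lastIdx (l : List String) (p : String) (k : Nat) :
    p ∈ l.drop k ↔ ∃ j, lastIdx l p = some j ∧ k ≤ j := by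
  induction l generalizing k with
  | nil => simp [lastIdx]
  | cons c rest ih =>
    cases k with
    | zero =>
      constructor
      · intro hp
        have : (lastIdx (c :: rest) p).isSome := (isSome_lastIdx _ _).mpr (by simpa using hp)
        cases h : lastIdx (c :: rest) p with
        | none => rw [h] at this; simp at this
        | some j => exact ⟨j, rfl, Nat.zero_le _⟩
      · rintro ⟨j, hj, -⟩
        have : (lastIdx (c :: rest) p).isSome := by simp [hj]
        simpa using (isSome_lastIdx _ _).mp this
    | succ k' =>
      rw [List.drop_succ_cons, ih]
      constructor
      · rintro ⟨j, hj, hle⟩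
        refine ⟨j + 1, ?_, by omega⟩
        simp [lastIdx, hj]
      · rintro ⟨j, hj, hle⟩
        cases hr : lastIdx rest p with
        | some j' =>
          simp [lastIdx, hr] at hj
          exact ⟨j', rfl, by omega⟩
        | none =>
          simp [lastIdx, hr] at hj
          by_cases hc : c = p
          · simp [hc] at hj; omega
          · simp [hc] at hj

-- buildLast computes the last-occurrence index (shifted by the running counter)
lemma get?_buildLast (l : List String) (i0 : Int) (d : PySem.Dict String Int) (p : String) :
    (buildLast i0 d l).get? p
      = match lastIdx l p with
        | some j => some (i0 + j)
        | none => d.get? p := by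
  induction l generalizing i0 d with
  | nil => simp [buildLast, lastIdx]
  | cons c rest ih =>
    simp only [buildLast, lastIdx, ih]
    cases hr : lastIdx rest p with
    | some j =>
      simp only []
      congr 1
      push_cast
      ring
    | none =>
      by_cases hc : c = p
      · subst hc
        simp [PySem.Dict.get?_insert_self]
      · rw [if_neg hc, PySem.Dict.get?_insert, if_neg (show ¬ p = c from fun h => hc h.symm)]

-- association-list lookup vs membership (keys Nodup)
lemma pvLookup_of_mem {rules : List (String × List String)} {c : String} {req : List String}
    (hnd : (rules.map Prod.fst).Nodup) (hmem : (c, req) ∈ rules) :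
    pvLookup rules c = some req := by
  induction rules with
  | nil => simp at hmem
  | cons kv rest ih =>
    obtain ⟨k, v⟩ := kv
    simp only [List.map_cons, List.nodup_cons] at hnd
    rcases List.mem_cons.mp hmem with h | h
    · cases h; simp [pvLookup]
    · have hk : k ≠ c := by
        intro he
        exact hnd.1 (he ▸ (List.mem_map.mpr ⟨(c, req), h, rfl⟩))
      simp only [pvLookup, beq_iff_eq, if_neg hk]
      exact ih hnd.2 h

lemma mem_of_pvLookup {rules : List (String × List String)} {c : String} {req : List String}
    (h : pvLookup rules c = some req) : (c, req) ∈ rules := by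
  induction rules with
  | nil => simp [pvLookup] at h
  | cons kv rest ih =>
    obtain ⟨k, v⟩ := kv
    simp only [pvLookup, beq_iff_eq] at h
    by_cases hk : k = c
    · simp [hk] at h; subst hk; subst h; exact List.mem_cons_self
    · simp [hk] at h; exact List.mem_cons_of_mem _ (ih h)

-- A returns true iff every occurrence has its required pages in the suffix after it
lemma isGoodA_iff (rules : List (String × List String)) (l : List String) :
    isGoodA rules l = true
      ↔ ∀ i c req, l[i]? = some c → pvLookup rules c = some req →
          ∀ p ∈ req, p ∈ l.drop (i + 1) := by
  induction l with
  | nil => simp [isGoodA]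
  | cons c rest ih =>
    have step :
        (∀ i c' req, (c :: rest)[i]? = some c' → pvLookup rules c' = some req →
            ∀ p ∈ req, p ∈ (c :: rest).drop (i + 1))
          ↔ ((∀ req, pvLookup rules c = some req → ∀ p ∈ req, p ∈ rest)
              ∧ ∀ i c' req, rest[i]? = some c' → pvLookup rules c' = some req →
                  ∀ p ∈ req, p ∈ rest.drop (i + 1)) := by
      constructor
      · intro h
        refine ⟨fun req hreq => by simpa using h 0 c req (by simp) hreq, ?_⟩
        intro i c' req hget hreq
        simpa using h (i + 1) c' req (by simpa using hget) hreq
      · rintro ⟨h0, hrest⟩ i c' req hget hreq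
        cases i with
        | zero => simp at hget; subst hget; simpa using h0 req hreq
        | succ i' =>
          simp only [List.getElem?_cons_succ] at hget
          simpa using hrest i' c' req hget hreq
    rw [step, ← ih]
    simp only [isGoodA]
    cases hl : pvLookup rules c with
    | none => simp
    | some req =>
      simp only [Bool.and_eq_true, List.all_eq_true]
      constructor
      · rintro ⟨h1, h2⟩
        exact ⟨fun req' hreq' => by
          cases hreq'
          intro p hp; simpa using h1 p hp, h2⟩
      · rintro ⟨h1, h2⟩
        exact ⟨fun p hp => by simpa using h1 req rfl p hp, h2⟩

-- B's rule scan returns true iff every rule entry passes the index test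
lemma checkRules_iff (last : PySem.Dict String Int) (rules : List (String × List String)) :
    checkRules last rules = true
      ↔ ∀ cr ∈ rules, ∀ i, last.get? cr.1 = some i →
          ∀ p ∈ cr.2, i < last.getD p (-1) := by
  induction rules with
  | nil => simp [checkRules]
  | cons kv rest ih =>
    obtain ⟨c, req⟩ := kv
    cases hc : PySem.Dict.get? last c with
    | none =>
      have hstep : checkRules last ((c, req) :: rest) = checkRules last rest := by
        simp only [checkRules, hc]
      rw [hstep, ih]
      constructor
      · intro h cr hcr i hi p hp
        rcases List.mem_cons.mp hcr with he | he
        · cases he; rw [hc] at hi; cases hi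
        · exact h cr he i hi p hp
      · intro h cr hcr i hi p hp
        exact h cr (List.mem_cons_of_mem _ hcr) i hi p hp
    | some i =>
      have hstep : checkRules last ((c, req) :: rest)
          = if req.all (fun p => decide (i < PySem.Dict.getD last p (-1))) then checkRules last rest
            else false := by
        simp only [checkRules, hc]
      rw [hstep]
      by_cases hall : req.all (fun p => decide (i < PySem.Dict.getD last p (-1))) = true
      · rw [if_pos hall, ih]
        simp only [List.all_eq_true, decide_eq_true_eq] at hall
        constructor
        · intro h cr hcr i' hi' p hp
          rcases List.mem_cons.mp hcr with he | he
          · cases he; rw [hc] at hi'; cases hi'; exact hall p hp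
          · exact h cr he i' hi' p hp
        · intro h cr hcr i' hi' p hp
          exact h cr (List.mem_cons_of_mem _ hcr) i' hi' p hp
      · rw [if_neg hall]
        simp only [List.all_eq_true, decide_eq_true_eq, not_forall] at hall
        obtain ⟨p, hp, hlt⟩ := hall
        constructor
        · intro h; exact Bool.noConfusion h
        · intro h
          exact absurd (h (c, req) List.mem_cons_self i hc p hp) hlt

-- ===== VERDICT (by name: the statement is the Claim_ definition above) =====
theorem is_good_update_spec : Claim_equal_is_good_update := by
  intro update rules _ hnd
  unfold Spec_is_good_update is_good_update is_good_update_alt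
  rw [Bool.eq_iff_iff, isGoodA_iff, checkRules_iff]
  have hget : ∀ p, (buildLast 0 PySem.Dict.empty update).get? p
      = match lastIdx update p with
        | some j => some ((j : Int))
        | none => none := by
    intro p
    rw [get?_buildLast]
    cases lastIdx update p <;> simp [PySem.Dict.get?_empty]
  constructor
  · -- A's condition → B's condition
    intro hA cr hcr i hi p hp
    have hic := hget cr.1
    rw [hi] at hic
    cases hjc : lastIdx update cr.1 with
    | none => rw [hjc] at hic; cases hic
    | some jc =>
      rw [hjc] at hic
      cases hic
      have hocc : update[jc]? = some cr.1 := get?_lastIdx hjc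
      have hlook : pvLookup rules cr.1 = some cr.2 := pvLookup_of_mem hnd hcr
      have hmem : p ∈ update.drop (jc + 1) := hA jc cr.1 cr.2 hocc hlook p hp
      obtain ⟨jp, hjp, hle⟩ := (mem_drop_iff_lastIdx update p (jc + 1)).mp hmem
      rw [PySem.Dict.getD_eq_get?_getD, hget p, hjp]
      simp only [Option.getD_some]
      exact_mod_cast (by omega : jc < jp)
  · -- B's condition → A's condition
    intro hB i c req hgeti hlook p hp
    have hcr : (c, req) ∈ rules := mem_of_pvLookup hlook
    obtain ⟨jc, hjc, hij⟩ := lastIdx_ge hgeti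
    have hic : (buildLast 0 PySem.Dict.empty update).get? c = some (jc : Int) := by
      rw [hget c, hjc]
    have hlt := hB (c, req) hcr (jc : Int) hic p hp
    rw [PySem.Dict.getD_eq_get?_getD, hget p] at hlt
    cases hjp : lastIdx update p with
    | none => rw [hjp] at hlt; simp at hlt; omega
    | some jp =>
      rw [hjp] at hlt
      simp only [Option.getD_some] at hlt
      have : jc < jp := by exact_mod_cast hlt
      exact (mem_drop_iff_lastIdx update p (i + 1)).mpr ⟨jp, hjp, by omega⟩
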